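-- pv_equiv track=rewrite | github.com/olaugh/mac-maven-analysis | dump_dawg.py | walk_word
-- ===== SOURCE A (Python) =====
-- def decode_entry(entry):
--     """Decode a DAWG entry into its components."""
--     letter = chr(entry & 0xFF) if (entry & 0xFF) >= 0x20 else '?'
--     is_word = bool(entry & 0x100)      # Bit 8
--     is_last = bool(entry & 0x200)      # Bit 9
--     child = entry >> 10                 # Bits 10+
--     return letter, is_word, is_last, child
--
-- def walk_word(entries, node_idx, remaining):
--     """Try to walk a word through the DAWG."""
--     if not remaining:
--         return True  # Found all letters
--
--     if node_idx <= 0 or node_idx >= len(entries):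
--         return False
--
--     target = remaining[0]
--     idx = node_idx
--
--     while idx < len(entries):
--         entry = entries[idx]
--         letter, is_word, is_last, child = decode_entry(entry)
--
--         if letter == target:
--             if len(remaining) == 1:
--                 return is_word  # Last letter - must be word ending
--             else:
--                 return walk_word(entries, child, remaining[1:])
--
--         if is_last:
--             break
--         idx += 1
--
--     return False
-- ===== SOURCE B (Python) =====
-- def walk_word(entries, node_idx, remaining):
--     """Try to walk a word through the DAWG (iterative; per-node sibling run built then searched)."""
--     if not remaining:
--         return True
--     i = 0
--     while True:
--         if node_idx <= 0 or node_idx >= len(entries):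
--             return False
--         # collect the sibling run starting at node_idx (inclusive of the is_last entry)
--         run = []
--         idx = node_idx
--         while idx < len(entries):
--             run.append(entries[idx])
--             if entries[idx] & 0x200:
--                 break
--             idx += 1
--         # find the first sibling carrying the wanted letter
--         target = remaining[i]
--         found = None
--         for e in run:
--             low = e & 0xFF
--             letter = chr(low) if low >= 0x20 else '?'
--             if letter == target:
--                 found = e
--                 break
--         if found is None:
--             return False
--         if i == len(remaining) - 1:
--             return bool(found & 0x100)
--         node_idx = found >> 10
--         i += 1
-- ===== Notes on version B (the rewrite author's own statement) =====
-- stated objective: alternative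
-- what changed: Replaces the tail recursion over word suffixes by an explicit loop over letter positions, and replaces the fused scan-and-decode sibling while-loop by first materialising the sibling run and then searching it for the target letter.
import Mathlib
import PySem

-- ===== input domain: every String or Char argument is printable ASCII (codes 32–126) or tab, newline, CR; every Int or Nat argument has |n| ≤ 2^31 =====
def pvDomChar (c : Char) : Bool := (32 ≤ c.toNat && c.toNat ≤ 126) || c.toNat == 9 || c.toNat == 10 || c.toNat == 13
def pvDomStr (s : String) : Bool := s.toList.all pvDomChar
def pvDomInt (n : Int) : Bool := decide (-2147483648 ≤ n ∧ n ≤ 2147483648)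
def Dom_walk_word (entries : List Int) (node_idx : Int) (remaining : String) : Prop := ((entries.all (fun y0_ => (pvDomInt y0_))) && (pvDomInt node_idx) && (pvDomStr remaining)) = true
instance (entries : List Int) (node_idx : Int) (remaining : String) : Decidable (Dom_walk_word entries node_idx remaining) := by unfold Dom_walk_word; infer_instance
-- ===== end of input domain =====

-- B rewrites A's tail recursion as an explicit loop over letter positions and
-- searches a materialised sibling run instead of a fused scan; same cost (alternative).


-- ===== PORT A =====
-- decode_entry; (letter, is_word, is_last, child)
def pvDecodeA (entry : Int) : Char × Bool × Bool × Int :=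
  let low := PySem.Int.band entry 255
  (if 32 ≤ low then Char.ofNat low.toNat else '?',
   PySem.Int.band entry 256 != 0,
   PySem.Int.band entry 512 != 0,
   PySem.Int.floordiv entry 1024)

-- A's inner `while idx < len(entries)` loop, scanning siblings for `target`;
-- fuel = entries.length - idx keeps the invariant; returns the matched entry.
def pvScanA (entries : List Int) (target : Char) : Nat → Nat → Option Int
  | _, 0 => none
  | idx, fuel+1 =>
    if idx < entries.length then
      let entry := entries.getD idx 0
      let d := pvDecodeA entry
      if d.1 = target then some entry
      else if d.2.2.1 then none
      else pvScanA entries target (idx+1) fuel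
    else none

-- A's recursion over the remaining letters (as a list of chars)
def pvWalkA (entries : List Int) : Int → List Char → Bool
  | _, [] => true
  | node_idx, c :: cs =>
    if node_idx ≤ 0 ∨ (entries.length : Int) ≤ node_idx then false
    else
      match pvScanA entries c node_idx.toNat (entries.length - node_idx.toNat) with
      | none => false
      | some e =>
        let d := pvDecodeA e
        match cs with
        | [] => d.2.1
        | c' :: cs' => pvWalkA entries d.2.2.2 (c' :: cs')

def walk_word (entries : List Int) (node_idx : Int) (remaining : String) : Bool :=
  pvWalkA entries node_idx remaining.toList

-- ===== PORT B =====
def pvLetterB (e : Int) : Char :=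
  let low := PySem.Int.band e 255
  if 32 ≤ low then Char.ofNat low.toNat else '?'

-- B's inner run-collecting loop: siblings from idx up to and including the is_last entry
def pvRunB (entries : List Int) : Nat → Nat → List Int
  | _, 0 => []
  | idx, fuel+1 =>
    if idx < entries.length then
      let e := entries.getD idx 0
      if PySem.Int.band e 512 != 0 then [e]
      else e :: pvRunB entries (idx+1) fuel
    else []

-- B's outer `while True` loop: one step per letter position
def pvWalkB (entries : List Int) : Int → Char → List Char → Bool
  | node_idx, c, rest =>
    if node_idx ≤ 0 ∨ (entries.length : Int) ≤ node_idx then false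
    else
      match (pvRunB entries node_idx.toNat (entries.length - node_idx.toNat)).find?
              (fun e => pvLetterB e == c) with
      | none => false
      | some e =>
        match rest with
        | [] => PySem.Int.band e 256 != 0
        | c' :: rest' => pvWalkB entries (PySem.Int.floordiv e 1024) c' rest'

def walk_word_alt (entries : List Int) (node_idx : Int) (remaining : String) : Bool :=
  match remaining.toList with
  | [] => true
  | c :: cs => pvWalkB entries node_idx c cs

-- ===== PRECONDITION & SPEC =====
def Spec_walk_word (entries : List Int) (node_idx : Int) (remaining : String) (out : Bool) : Prop := out = walk_word_alt entries node_idx remaining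
instance (entries : List Int) (node_idx : Int) (remaining : String) (out : Bool) : Decidable (Spec_walk_word entries node_idx remaining out) := by unfold Spec_walk_word; infer_instance

-- ===== CLAIM (what is proved, stated in full; the proofs are below) =====
def Claim_equal_walk_word : Prop := ∀ (entries : List Int) (node_idx : Int) (remaining : String), Dom_walk_word entries node_idx remaining → Spec_walk_word entries node_idx remaining (walk_word entries node_idx remaining)

-- ===== LEMMAS AND PROOFS =====

-- A's fused scan equals B's run-then-find?
theorem scan_eq_find (entries : List Int) (target : Char) :
    ∀ (fuel idx : Nat),
      pvScanA entries target idx fuel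
        = (pvRunB entries idx fuel).find? (fun e => pvLetterB e == target) := by
  intro fuel
  induction fuel with
  | zero => intro idx; simp [pvScanA, pvRunB]
  | succ n ih =>
    intro idx
    rw [pvScanA, pvRunB]
    by_cases h : idx < entries.length
    · rw [if_pos h, if_pos h]
      generalize entries.getD idx 0 = e
      have h1 : (pvDecodeA e).1 = pvLetterB e := rfl
      have h2 : (pvDecodeA e).2.2.1 = (PySem.Int.band e 512 != 0) := rfl
      by_cases hl : PySem.Int.band e 512 = 0
      · by_cases hm : pvLetterB e = target
        · simp [h1, hl, hm]
        · simp [h1, h2, hl, hm, ih]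
      · by_cases hm : pvLetterB e = target
        · simp [h1, hl, hm]
        · simp [h1, h2, hl, hm]
    · rw [if_neg h, if_neg h]; rfl

theorem walkA_eq_walkB (entries : List Int) :
    ∀ (cs : List Char) (c : Char) (node_idx : Int),
      pvWalkA entries node_idx (c :: cs) = pvWalkB entries node_idx c cs := by
  intro cs
  induction cs with
  | nil =>
    intro c node_idx
    rw [pvWalkA.eq_def, pvWalkB.eq_def]
    simp only [scan_eq_find]
    by_cases hg : node_idx ≤ 0 ∨ (entries.length : Int) ≤ node_idx
    · simp [hg]
    · simp only [if_neg hg]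
      cases hf : (pvRunB entries node_idx.toNat (entries.length - node_idx.toNat)).find?
          (fun e => pvLetterB e == c) with
      | none => simp
      | some e => simp [pvDecodeA]
  | cons c' cs' ih =>
    intro c node_idx
    rw [pvWalkA.eq_def, pvWalkB.eq_def]
    simp only [scan_eq_find]
    by_cases hg : node_idx ≤ 0 ∨ (entries.length : Int) ≤ node_idx
    · simp [hg]
    · simp only [if_neg hg]
      cases hf : (pvRunB entries node_idx.toNat (entries.length - node_idx.toNat)).find?
          (fun e => pvLetterB e == c) with
      | none => simp
      | some e => simp [pvDecodeA, ih]

-- ===== VERDICT (by name: the statement is the Claim_ definition above) =====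
theorem walk_word_spec : Claim_equal_walk_word := by
  intro entries node_idx remaining _
  unfold Spec_walk_word walk_word walk_word_alt
  cases remaining.toList with
  | nil => simp [pvWalkA]
  | cons c cs => exact walkA_eq_walkB entries cs c node_idx
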